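-- pv_equiv track=rewrite | github.com/SuchithSridhar/AdventOfCode2024 | day7-part1.py | eq_eval_recur
-- ===== SOURCE A (Python) =====
-- def eq_eval_recur(equation: tuple[int, list[int]]) -> int:
--     result, operands = equation
--
--     if len(operands) == 1:
--         if operands[0] == result:
--             return result
--         else:
--             return 0
--
--     lhs = operands.pop(0)
--     rhs = operands.pop(0)
--
--     # small optimization
--     if lhs > result or rhs > result:
--         return 0
--
--     add_value = eq_eval_recur((result, [lhs + rhs] + operands.copy()))
--     if add_value != 0:
--         return add_value
--
--     mult_value = eq_eval_recur((result, [lhs * rhs] + operands.copy()))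
--     return mult_value
-- ===== SOURCE B (Python) =====
-- # Forward set DP over reachable partial values (same prune as A); A pops from the
-- # caller's operand list in place, B does not mutate it -- equivalence is about the return value.
-- def eq_eval_recur(equation: tuple[int, list[int]]) -> int:
--     result, operands = equation
--     reach = {operands[0]}
--     for op in operands[1:]:
--         reach = {v for acc in reach
--                    if acc <= result and op <= result
--                    for v in (acc + op, acc * op)}
--     return result if result in reach else 0
-- ===== Notes on version B (the rewrite author's own statement) =====
-- stated objective: faster
-- what changed: Replaced A's exponential branching recursion (try + then × at each split, with early return) by a single forward pass maintaining the set of reachable partial values, applying A's same per-step prune (value or next operand > result) as a filter.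
import Mathlib
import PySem

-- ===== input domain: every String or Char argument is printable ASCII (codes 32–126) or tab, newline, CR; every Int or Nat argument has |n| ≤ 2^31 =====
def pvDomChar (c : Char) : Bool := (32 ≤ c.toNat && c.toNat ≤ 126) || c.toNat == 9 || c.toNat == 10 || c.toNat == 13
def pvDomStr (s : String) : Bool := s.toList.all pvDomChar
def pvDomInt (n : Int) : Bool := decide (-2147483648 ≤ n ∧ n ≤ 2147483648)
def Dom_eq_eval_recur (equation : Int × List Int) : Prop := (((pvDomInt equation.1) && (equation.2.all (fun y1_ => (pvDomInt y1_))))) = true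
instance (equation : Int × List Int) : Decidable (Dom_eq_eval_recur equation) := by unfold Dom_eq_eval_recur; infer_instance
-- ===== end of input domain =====

-- B replaces A's exponential try-+/× recursion by one forward pass over a set of reachable
-- partial values with the same per-step prune; A pops two elements from the caller's operand
-- list in place, B does not mutate it — the equivalence proved is about the return value only.


-- ===== PORT A =====
def eq_eval_recur (equation : Int × List Int) : Int :=
  match equation with
  | (result, [x]) => if x = result then result else 0
  | (result, lhs :: rhs :: rest) =>
      if lhs > result ∨ rhs > result then 0
      else
        let add_value := eq_eval_recur (result, (lhs + rhs) :: rest)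
        if add_value ≠ 0 then add_value
        else eq_eval_recur (result, (lhs * rhs) :: rest)
  | (_, []) => 0   -- Python raises IndexError here (pop from empty list); excluded by Pre_
termination_by equation.2.length
decreasing_by all_goals simp

-- ===== PORT B =====
-- loop body of B: {v for acc in reach if acc <= result and op <= result for v in (acc+op, acc*op)}
def altStep (result : Int) (reach : PySem.Set Int) (op : Int) : PySem.Set Int :=
  PySem.Set.ofList (reach.flatMap (fun acc =>
    if acc ≤ result ∧ op ≤ result then [acc + op, acc * op] else []))

def eq_eval_recur_alt (equation : Int × List Int) : Int :=
  match equation with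
  | (_, []) => 0   -- Python raises IndexError here (operands[0]); excluded by Pre_
  | (result, first :: rest) =>
      let reach := rest.foldl (altStep result) (PySem.Set.ofList [first])
      if reach.contains result then result else 0

-- ===== PRECONDITION & SPEC =====
-- A raises IndexError on an empty operand list (and so does B); nothing else is excluded.
def Pre_eq_eval_recur (equation : Int × List Int) : Prop := equation.2 ≠ []
instance (equation : Int × List Int) : Decidable (Pre_eq_eval_recur equation) := by unfold Pre_eq_eval_recur; infer_instance
def pvWitness_eq_eval_recur : (Int × List Int) := (190, [10, 19])

def Spec_eq_eval_recur (equation : Int × List Int) (out : Int) : Prop := out = eq_eval_recur_alt equation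
instance (equation : Int × List Int) (out : Int) : Decidable (Spec_eq_eval_recur equation out) := by unfold Spec_eq_eval_recur; infer_instance

-- ===== CLAIM (what is proved, stated in full; the proofs are below) =====
def Claim_equal_eq_eval_recur : Prop := ∀ (equation : Int × List Int), Dom_eq_eval_recur equation → Pre_eq_eval_recur equation → Spec_eq_eval_recur equation (eq_eval_recur equation)

-- ===== LEMMAS AND PROOFS =====

-- the loop body on plain lists (no dedup): membership is all that matters
def stepL (result op : Int) (S : List Int) : List Int :=
  S.flatMap (fun acc => if acc ≤ result ∧ op ≤ result then [acc + op, acc * op] else [])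

def foldL (result : Int) (S : List Int) (ops : List Int) : List Int :=
  ops.foldl (fun S op => stepL result op S) S

lemma mem_stepL {result op x : Int} {S : List Int} :
    x ∈ stepL result op S ↔ ∃ acc ∈ S, (acc ≤ result ∧ op ≤ result) ∧ (x = acc + op ∨ x = acc * op) := by
  simp only [stepL, List.mem_flatMap]
  constructor
  · rintro ⟨a, ha, hx⟩
    by_cases hc : a ≤ result ∧ op ≤ result
    · rw [if_pos hc] at hx
      simp only [List.mem_cons, List.not_mem_nil, or_false] at hx
      exact ⟨a, ha, hc, hx⟩
    · rw [if_neg hc] at hx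
      exact absurd hx (List.not_mem_nil)
  · rintro ⟨a, ha, hc, hx⟩
    refine ⟨a, ha, ?_⟩
    rw [if_pos hc]
    rcases hx with h | h <;> simp [h]

lemma altStep_mem (result op x : Int) (S S' : List Int) (h : ∀ y, y ∈ S ↔ y ∈ S') :
    x ∈ altStep result S op ↔ x ∈ stepL result op S' := by
  simp only [altStep, PySem.Set.mem_ofList]
  rw [show (S.flatMap (fun acc => if acc ≤ result ∧ op ≤ result then [acc + op, acc * op] else [])) = stepL result op S from rfl]
  rw [mem_stepL, mem_stepL]
  constructor
  · rintro ⟨a, ha, rest⟩; exact ⟨a, (h a).mp ha, rest⟩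
  · rintro ⟨a, ha, rest⟩; exact ⟨a, (h a).mpr ha, rest⟩

lemma fold_mem (result : Int) (ops : List Int) :
    ∀ (S S' : List Int), (∀ y, y ∈ S ↔ y ∈ S') →
      ∀ x, x ∈ ops.foldl (altStep result) S ↔ x ∈ foldL result S' ops := by
  induction ops with
  | nil => intro S S' h x; simpa [foldL] using h x
  | cons op ops ih =>
      intro S S' h x
      simp only [List.foldl_cons, foldL] at *
      exact ih _ _ (fun y => altStep_mem result op y S S' h) x

lemma foldL_nil_seed (result : Int) (ops : List Int) :
    foldL result [] ops = [] := by
  induction ops with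
  | nil => rfl
  | cons op ops ih => simpa [foldL, stepL] using ih

lemma foldL_append (result : Int) (ops : List Int) :
    ∀ (S1 S2 : List Int) (x : Int),
      x ∈ foldL result (S1 ++ S2) ops ↔ x ∈ foldL result S1 ops ∨ x ∈ foldL result S2 ops := by
  induction ops with
  | nil => intro S1 S2 x; simp [foldL]
  | cons op ops ih =>
      intro S1 S2 x
      have hstep : stepL result op (S1 ++ S2) = stepL result op S1 ++ stepL result op S2 := by
        simp [stepL]
      simp only [foldL, List.foldl_cons] at *
      rw [hstep]
      exact ih _ _ x

-- A's recursion computes membership of result in the forward fold from a single seed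
lemma A_eq_fold (result : Int) (ops : List Int) :
    ∀ acc : Int, eq_eval_recur (result, acc :: ops)
      = if result ∈ foldL result [acc] ops then result else 0 := by
  induction ops with
  | nil =>
      intro acc
      simp only [eq_eval_recur, foldL, List.foldl_nil, List.mem_singleton]
      rcases eq_or_ne acc result with h | h
      · simp [h]
      · rw [if_neg h, if_neg (fun hh => h hh.symm)]
  | cons op ops ih =>
      intro acc
      rw [eq_eval_recur]
      simp only [foldL, List.foldl_cons]
      by_cases hp : acc > result ∨ op > result
      · have hstep : stepL result op [acc] = [] := by
          simp only [stepL, List.flatMap_cons, List.flatMap_nil, List.append_nil]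
          rw [if_neg (by omega)]
        have hnil : result ∉ List.foldl (fun S op => stepL result op S) (stepL result op [acc]) ops := by
          rw [hstep]
          rw [show List.foldl (fun S op => stepL result op S) [] ops = foldL result [] ops from rfl]
          rw [foldL_nil_seed]
          exact List.not_mem_nil
        rw [if_pos hp, if_neg hnil]
      · have hstep : stepL result op [acc] = [acc + op] ++ [acc * op] := by
          simp only [stepL, List.flatMap_cons, List.flatMap_nil, List.append_nil]
          rw [if_pos (by omega)]
          rfl
        have hsplit : (result ∈ List.foldl (fun S op => stepL result op S) (stepL result op [acc]) ops)
            ↔ result ∈ foldL result [acc + op] ops ∨ result ∈ foldL result [acc * op] ops := by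
          rw [show List.foldl (fun S op => stepL result op S) (stepL result op [acc]) ops
                = foldL result (stepL result op [acc]) ops from rfl, hstep]
          exact foldL_append result ops _ _ result
        rw [if_neg hp, ih (acc + op), ih (acc * op)]
        by_cases h1 : result ∈ foldL result [acc + op] ops <;>
          by_cases h2 : result ∈ foldL result [acc * op] ops <;>
          by_cases hr : result = 0 <;>
          simp [h1, h2, hr, hsplit]

-- ===== VERDICT (by name: the statement is the Claim_ definition above) =====
theorem eq_eval_recur_spec : Claim_equal_eq_eval_recur := by
  intro equation _ hpre
  obtain ⟨result, operands⟩ := equation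
  match operands with
  | [] => exact absurd rfl hpre
  | first :: rest =>
      unfold Spec_eq_eval_recur
      rw [A_eq_fold result rest first]
      simp only [eq_eval_recur_alt]
      have hmem := fold_mem result rest (PySem.Set.ofList [first]) [first]
        (fun y => by simp [PySem.Set.mem_ofList]) result
      have hc : ((rest.foldl (altStep result) (PySem.Set.ofList [first])).contains result = true)
          ↔ result ∈ foldL result [first] rest := by
        rw [PySem.Set.contains_iff]
        exact hmem
      by_cases h : result ∈ foldL result [first] rest
      · rw [if_pos h, if_pos (hc.mpr h)]
      · rw [if_neg h, if_neg (fun hh => h (hc.mp hh))]
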